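-- pv_equiv track=rewrite | github.com/BDoignies/GamGateQMC-v2 | contrib/QMC/RandomProfilerAnalyzer.py | get_chain_name
-- ===== SOURCE A (Python) =====
-- def get_chain_name(chain):
--     models = []
--
--     for link in chain:
--         if "nishina" in link["ClassName"].lower():
--             return link["ClassName"]
--
--     for link in chain:
--         if "livermorephotoelectricmodel" in link["ClassName"].lower():
--             return link["ClassName"]
--
--     for link in chain:
--         if "model" in link["ClassName"].lower():
--             return link["ClassName"]
--
--     if "" in models:
--         return ""
--
--     for link in chain[::-1]:
--         if "process" in link["ClassName"].lower():
--             return link["ClassName"]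
--
--     return "Unkown"
-- ===== SOURCE B (Python) =====
-- def get_chain_name(chain):
--     liv = model = proc = None
--     for link in chain:
--         name = link["ClassName"]
--         low = name.lower()
--         if "nishina" in low:
--             return name
--         if liv is None and "livermorephotoelectricmodel" in low:
--             liv = name
--         if model is None and "model" in low:
--             model = name
--         if "process" in low:
--             proc = name
--     if liv is not None:
--         return liv
--     if model is not None:
--         return model
--     if proc is not None:
--         return proc
--     return "Unkown"
-- ===== Notes on version B (the rewrite author's own statement) =====
-- stated objective: alternative
-- what changed: Four sequential scans (plus a reversed copy of the list) are replaced by one forward pass that returns at the first 'nishina' hit and otherwise records the first 'livermorephotoelectricmodel' name, the first 'model' name and the last 'process' name in three accumulators.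
import Mathlib
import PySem

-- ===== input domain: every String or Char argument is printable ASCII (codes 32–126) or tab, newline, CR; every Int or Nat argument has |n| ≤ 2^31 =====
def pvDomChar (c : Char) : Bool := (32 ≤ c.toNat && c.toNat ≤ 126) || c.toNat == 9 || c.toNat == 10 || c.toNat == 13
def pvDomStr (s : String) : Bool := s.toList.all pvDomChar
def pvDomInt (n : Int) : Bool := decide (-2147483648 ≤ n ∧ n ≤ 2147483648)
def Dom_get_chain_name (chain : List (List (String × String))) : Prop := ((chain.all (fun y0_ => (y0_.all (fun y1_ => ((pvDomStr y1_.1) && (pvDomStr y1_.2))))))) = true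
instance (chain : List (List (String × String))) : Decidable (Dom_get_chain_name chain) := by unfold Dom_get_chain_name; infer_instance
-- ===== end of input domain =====

-- B replaces A's four sequential scans (plus a reversed copy) by one forward pass with
-- three accumulators; objective: alternative (single forward pass, no reversed copy).

-- ===== PORT A =====
-- link["ClassName"]: first-match lookup in the association list; a missing key is a Python
-- KeyError, modeled here as "" and excluded by Pre_get_chain_name.
def pvCN (link : List (String × String)) : String :=
  (List.lookup "ClassName" link).getD ""

-- the shape shared by A's four 'for link in chain: if kw in link["ClassName"].lower(): return …' loops
def pvALoop (kw : String) : List (List (String × String)) → Option String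
  | [] => none
  | link :: rest =>
      if PySem.Str.isIn kw (PySem.Str.lower (pvCN link)) then some (pvCN link)
      else pvALoop kw rest

def get_chain_name (chain : List (List (String × String))) : String :=
  match pvALoop "nishina" chain with
  | some n => n
  | none =>
    match pvALoop "livermorephotoelectricmodel" chain with
    | some n => n
    | none =>
      match pvALoop "model" chain with
      | some n => n
      | none =>
        -- 'if "" in models: return ""' with models = []
        if ([] : List String).contains "" then ""
        else
          -- chain[::-1]
          match pvALoop "process" ((PySem.List.slice? chain none none (-1)).getD []) with
          | some n => n
          | none => "Unkown"

-- ===== PORT B =====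
-- one pass: return at the first nishina; keep first livermore, first model, last process
def pvBLoop : List (List (String × String)) → Option String → Option String → Option String → String
  | [], liv, model, proc =>
      match liv with
      | some n => n
      | none =>
        match model with
        | some n => n
        | none =>
          match proc with
          | some n => n
          | none => "Unkown"
  | link :: rest, liv, model, proc =>
      let name := pvCN link
      let low := PySem.Str.lower name
      if PySem.Str.isIn "nishina" low then name
      else
        pvBLoop rest
          (if liv.isNone && PySem.Str.isIn "livermorephotoelectricmodel" low then some name else liv)
          (if model.isNone && PySem.Str.isIn "model" low then some name else model)
          (if PySem.Str.isIn "process" low then some name else proc)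

def get_chain_name_alt (chain : List (List (String × String))) : String :=
  pvBLoop chain none none none

-- ===== PRECONDITION & SPEC =====
def pvHasCN (link : List (String × String)) : Bool :=
  (List.lookup "ClassName" link).isSome

def pvIsNish (link : List (String × String)) : Bool :=
  match List.lookup "ClassName" link with
  | some s => PySem.Str.isIn "nishina" (PySem.Str.lower s)
  | none => false

-- Pre_ excludes exactly the inputs on which A raises KeyError: a link without key "ClassName"
-- occurring before (or at) the first 'nishina' link; B raises KeyError there too.
def Pre_get_chain_name (chain : List (List (String × String))) : Prop :=
  ∀ i ∈ List.range chain.length,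
    (∀ j ∈ List.range i, pvIsNish chain[j]! = false) → pvHasCN chain[i]! = true
instance (chain : List (List (String × String))) : Decidable (Pre_get_chain_name chain) := by
  unfold Pre_get_chain_name; infer_instance

def pvWitness_get_chain_name : (List (List (String × String))) :=
  [[("ClassName", "ComptonProcess")], [("ClassName", "SomeModel")]]

def Spec_get_chain_name (chain : List (List (String × String))) (out : String) : Prop := out = get_chain_name_alt chain
instance (chain : List (List (String × String))) (out : String) : Decidable (Spec_get_chain_name chain out) := by unfold Spec_get_chain_name; infer_instance

-- ===== CLAIM (what is proved, stated in full; the proofs are below) =====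
def Claim_equal_get_chain_name : Prop := ∀ (chain : List (List (String × String))), Dom_get_chain_name chain → Pre_get_chain_name chain → Spec_get_chain_name chain (get_chain_name chain)

-- ===== LEMMAS AND PROOFS =====

-- first-match scan over an appended singleton
theorem pvALoop_append_singleton (kw : String) (xs : List (List (String × String)))
    (x : List (String × String)) :
    pvALoop kw (xs ++ [x]) =
      (pvALoop kw xs).or (if PySem.Str.isIn kw (PySem.Str.lower (pvCN x)) then some (pvCN x) else none) := by
  induction xs with
  | nil => simp [pvALoop]
  | cons y ys ih =>
      simp only [List.cons_append, pvALoop, ih]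
      split <;> simp

-- folding an accumulator update into Option.or (B keeps the FIRST match)
theorem pvOr_acc_first (o : Option String) (c : Bool) (name : String) (t : Option String) :
    (if o.isNone && c then some name else o).or t = o.or (if c then some name else t) := by
  cases o <;> cases c <;> simp [Option.or]

-- folding an accumulator update into Option.or (B keeps the LAST match)
theorem pvOr_acc_last (x : Option String) (c : Bool) (name : String) (proc : Option String) :
    (x.or (if c then some name else none)).or proc = x.or (if c then some name else proc) := by
  cases x <;> cases c <;> simp [Option.or]

-- the single pass equals the four scans, for any accumulator state
theorem pvBLoop_eq (chain : List (List (String × String))) :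
    ∀ liv model proc, pvBLoop chain liv model proc =
      match pvALoop "nishina" chain with
      | some n => n
      | none =>
        match liv.or (pvALoop "livermorephotoelectricmodel" chain) with
        | some n => n
        | none =>
          match model.or (pvALoop "model" chain) with
          | some n => n
          | none =>
            match (pvALoop "process" chain.reverse).or proc with
            | some n => n
            | none => "Unkown" := by
  induction chain with
  | nil => intro liv model proc; cases liv <;> cases model <;> cases proc <;> simp [pvBLoop, pvALoop]
  | cons link rest ih =>
      intro liv model proc
      by_cases hn : PySem.Str.isIn "nishina" (PySem.Str.lower (pvCN link)) = true
      · simp only [pvBLoop, pvALoop, hn]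
        simp
      · have hn' : PySem.Str.isIn "nishina" (PySem.Str.lower (pvCN link)) = false :=
          Bool.eq_false_iff.mpr hn
        simp only [pvBLoop, pvALoop, hn', Bool.false_eq_true, if_false, ih,
          List.reverse_cons, pvALoop_append_singleton]
        rw [pvOr_acc_first, pvOr_acc_first, pvOr_acc_last]

-- ===== VERDICT (by name: the statement is the Claim_ definition above) =====
theorem get_chain_name_spec : Claim_equal_get_chain_name := by
  intro chain _ _
  unfold Spec_get_chain_name get_chain_name get_chain_name_alt
  rw [pvBLoop_eq, PySem.List.slice?_none_none_neg_one]
  simp only [Option.getD, List.contains_nil, Bool.false_eq_true, if_false]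
  cases pvALoop "nishina" chain <;>
    cases pvALoop "livermorephotoelectricmodel" chain <;>
    cases pvALoop "model" chain <;>
    cases pvALoop "process" chain.reverse <;>
    simp [Option.or]
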